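-- pv_equiv track=rewrite | github.com/BertRules/Global_reconstruction_of_language_models_with_linguistic_rules | rule/aspectrulemine.py | __get_term_pos_type_rstTOP
-- ===== SOURCE A (Python) =====
-- def __get_term_pos_type_rstTOP(term_pos_tags):
--     for t in term_pos_tags:
--         if t  == 'NO_TOP_RST':
--             return 'NO_TOP_RST'
--     for t in term_pos_tags:
--         if t != 'NO_TOP_RST':
--             return t
--     return None
-- ===== SOURCE B (Python) =====
-- _SENTINEL = object()
--
-- def __get_term_pos_type_rstTOP(term_pos_tags):
--     first = _SENTINEL
--     for t in term_pos_tags: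
--         if t == 'NO_TOP_RST':
--             return 'NO_TOP_RST'
--         if first is _SENTINEL:
--             first = t
--     return None if first is _SENTINEL else first
-- ===== Notes on version B (the rewrite author's own statement) =====
-- stated objective: alternative
-- what changed: Fused A's two sequential scans into a single pass that returns 'NO_TOP_RST' immediately and otherwise remembers the first tag in a sentinel-initialized accumulator.
import Mathlib
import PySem

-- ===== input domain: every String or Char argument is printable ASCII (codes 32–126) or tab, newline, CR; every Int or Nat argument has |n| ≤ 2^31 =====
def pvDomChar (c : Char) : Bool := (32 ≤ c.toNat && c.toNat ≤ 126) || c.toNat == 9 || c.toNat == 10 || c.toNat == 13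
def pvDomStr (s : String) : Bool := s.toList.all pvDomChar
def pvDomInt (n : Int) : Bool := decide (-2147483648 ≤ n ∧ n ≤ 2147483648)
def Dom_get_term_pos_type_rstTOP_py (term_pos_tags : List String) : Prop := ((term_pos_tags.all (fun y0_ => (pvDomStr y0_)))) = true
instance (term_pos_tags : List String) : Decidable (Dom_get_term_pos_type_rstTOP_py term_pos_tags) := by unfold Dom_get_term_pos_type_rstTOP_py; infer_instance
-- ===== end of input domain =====

-- B fuses A's two sequential scans into a single pass with early return and a remembered first tag (alternative decomposition, same cost).


-- ===== PORT A =====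
-- first for-loop: return 'NO_TOP_RST' on the first match
def pvALoop1 : List String → Option String
  | [] => none
  | t :: rest => if t == "NO_TOP_RST" then some "NO_TOP_RST" else pvALoop1 rest

-- second for-loop: return the first tag different from 'NO_TOP_RST'
def pvALoop2 : List String → Option String
  | [] => none
  | t :: rest => if t != "NO_TOP_RST" then some t else pvALoop2 rest

def get_term_pos_type_rstTOP_py (term_pos_tags : List String) : Option String :=
  match pvALoop1 term_pos_tags with
  | some r => some r
  | none => pvALoop2 term_pos_tags

-- ===== PORT B =====
-- B: one pass; early return on 'NO_TOP_RST', else remember the first tag (none = sentinel)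
def pvBLoop : List String → Option String → Option String
  | [], first => first
  | t :: rest, first =>
      if t == "NO_TOP_RST" then some "NO_TOP_RST"
      else pvBLoop rest (if first.isNone then some t else first)

def get_term_pos_type_rstTOP_py_alt (term_pos_tags : List String) : Option String :=
  pvBLoop term_pos_tags none

-- ===== PRECONDITION & SPEC =====
def Spec_get_term_pos_type_rstTOP_py (term_pos_tags : List String) (out : Option String) : Prop := out = get_term_pos_type_rstTOP_py_alt term_pos_tags
instance (term_pos_tags : List String) (out : Option String) : Decidable (Spec_get_term_pos_type_rstTOP_py term_pos_tags out) := by unfold Spec_get_term_pos_type_rstTOP_py; infer_instance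

-- ===== CLAIM (what is proved, stated in full; the proofs are below) =====
def Claim_equal_get_term_pos_type_rstTOP_py : Prop := ∀ (term_pos_tags : List String), Dom_get_term_pos_type_rstTOP_py term_pos_tags → Spec_get_term_pos_type_rstTOP_py term_pos_tags (get_term_pos_type_rstTOP_py term_pos_tags)

-- ===== LEMMAS AND PROOFS =====

-- invariant relating B's fused loop to A's two loops, generalized over the accumulator
theorem pvBLoop_eq (xs : List String) : ∀ first : Option String,
    pvBLoop xs first =
      match pvALoop1 xs with
      | some r => some r
      | none => match first with | some f => some f | none => pvALoop2 xs := by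
  induction xs with
  | nil => intro first; cases first <;> simp [pvBLoop, pvALoop1, pvALoop2]
  | cons t rest ih =>
      intro first
      by_cases h : t == "NO_TOP_RST"
      · simp [pvBLoop, pvALoop1, h]
      · have h' : t ≠ "NO_TOP_RST" := by simpa using h
        cases first <;> simp [pvBLoop, pvALoop1, pvALoop2, h, h', ih]

-- ===== VERDICT (by name: the statement is the Claim_ definition above) =====
theorem get_term_pos_type_rstTOP_py_spec : Claim_equal_get_term_pos_type_rstTOP_py := by
  intro xs _
  show get_term_pos_type_rstTOP_py xs = get_term_pos_type_rstTOP_py_alt xs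
  simp [get_term_pos_type_rstTOP_py, get_term_pos_type_rstTOP_py_alt, pvBLoop_eq]
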